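-- pv_equiv track=rewrite | github.com/IRakow/AIAVIIZN | Agent All Working/automated_appfolio_builder_PLAYWRIGHT_ENHANCED.py | substitute_branding
-- ===== SOURCE A (Python) =====
-- def substitute_branding(content: str) -> str:
--     """Apply branding substitutions to content"""
--     # Replace AppFolio branding with AIVIIZN branding
--     substitutions = {
--         "AppFolio": "AIVIIZN",
--         "appfolio": "aiviizn",
--         "APPFOLIO": "AIVIIZN"
--     }
--
--     for old, new in substitutions.items():
--         content = content.replace(old, new)
--
--     return content
-- ===== SOURCE B (Python) =====
-- def substitute_branding(content: str) -> str:
--     """Apply branding substitutions to content"""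
--     # One left-to-right scan with a dispatch table instead of three
--     # sequential full-string replace passes.
--     table = (("AppFolio", "AIVIIZN"), ("appfolio", "aiviizn"), ("APPFOLIO", "AIVIIZN"))
--     out = []
--     i = 0
--     n = len(content)
--     while i < n:
--         for old, new in table:
--             if content.startswith(old, i):
--                 out.append(new)
--                 i += len(old)
--                 break
--         else:
--             out.append(content[i])
--             i += 1
--     return "".join(out)
-- ===== Notes on version B (the rewrite author's own statement) =====
-- stated objective: alternative
-- what changed: B makes a single left-to-right scan with a substitution dispatch table, emitting the replacement wherever one of the three literals starts, instead of A's three sequential full-string str.replace passes.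
import Mathlib
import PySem

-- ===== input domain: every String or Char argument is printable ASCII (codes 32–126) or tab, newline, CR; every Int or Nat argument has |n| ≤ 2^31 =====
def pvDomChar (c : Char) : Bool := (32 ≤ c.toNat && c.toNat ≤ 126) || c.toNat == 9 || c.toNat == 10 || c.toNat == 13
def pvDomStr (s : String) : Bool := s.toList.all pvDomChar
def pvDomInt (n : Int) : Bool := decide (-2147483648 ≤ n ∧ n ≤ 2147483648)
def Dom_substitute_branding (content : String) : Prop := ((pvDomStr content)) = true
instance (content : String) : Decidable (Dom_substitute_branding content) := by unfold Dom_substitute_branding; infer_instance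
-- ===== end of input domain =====

-- B replaces A's three sequential full-string replace passes by ONE left-to-right scan
-- with a substitution dispatch table (objective: alternative decomposition, same O(n) cost).

-- ===== PORT A =====
-- A: three sequential str.replace passes, in the dict's insertion order.
def substitute_branding (content : String) : String :=
  PySem.Str.replace
    (PySem.Str.replace
      (PySem.Str.replace content "AppFolio" "AIVIIZN")
      "appfolio" "aiviizn")
    "APPFOLIO" "AIVIIZN"

-- ===== PORT B =====
-- the three table keys and the two replacement strings, as char lists
def pvP1 : List Char := ['A','p','p','F','o','l','i','o']
def pvP2 : List Char := ['a','p','p','f','o','l','i','o']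
def pvP3 : List Char := ['A','P','P','F','O','L','I','O']
def pvR  : List Char := ['A','I','V','I','I','Z','N']
def pvRl : List Char := ['a','i','v','i','i','z','n']

-- hand port of B's while-loop over positions: structural recursion on the char list;
-- the for/else over the dict becomes the ordered three-way startswith test (exact:
-- B's dict iterates its three fixed keys in insertion order, each of length 8).
def pvScanB : List Char → List Char
  | [] => []
  | c :: t =>
    if pvP1.isPrefixOf (c :: t) then pvR ++ pvScanB (t.drop 7)
    else if pvP2.isPrefixOf (c :: t) then pvRl ++ pvScanB (t.drop 7)
    else if pvP3.isPrefixOf (c :: t) then pvR ++ pvScanB (t.drop 7)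
    else c :: pvScanB t
termination_by l => l.length
decreasing_by all_goals simp [List.length_drop]

def substitute_branding_alt (content : String) : String :=
  String.ofList (pvScanB content.toList)

-- ===== PRECONDITION & SPEC =====
def Spec_substitute_branding (content : String) (out : String) : Prop := out = substitute_branding_alt content
instance (content : String) (out : String) : Decidable (Spec_substitute_branding content out) := by unfold Spec_substitute_branding; infer_instance

-- ===== CLAIM (what is proved, stated in full; the proofs are below) =====
def Claim_equal_substitute_branding : Prop := ∀ (content : String), Dom_substitute_branding content → Spec_substitute_branding content (substitute_branding content)

-- ===== LEMMAS AND PROOFS =====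

-- structural characterisation of Python's str.replace (nonempty pattern)
def pvRep (old new : List Char) : List Char → List Char
  | [] => []
  | c :: t =>
    if old.isPrefixOf (c :: t) ∧ old ≠ [] then new ++ pvRep old new (t.drop (old.length - 1))
    else c :: pvRep old new t
termination_by l => l.length
decreasing_by all_goals simp [List.length_drop]

theorem pvGo_eq (old new : List Char) (hold : old ≠ []) :
    ∀ (fuel : Nat) (l acc : List Char), l.length ≤ fuel →
      PySem.Chars.replace.go old new fuel l acc = acc.reverse ++ pvRep old new l := by
  intro fuel
  induction fuel with
  | zero =>
    intro l acc hl
    have : l = [] := by cases l <;> simp_all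
    subst this
    simp [PySem.Chars.replace.go, pvRep]
  | succ n ih =>
    intro l acc hl
    match l with
    | [] => simp [PySem.Chars.replace.go, pvRep]
    | c :: t =>
      obtain ⟨o, os, rfl⟩ : ∃ o os, old = o :: os := by
        cases old with
        | nil => exact absurd rfl hold
        | cons o os => exact ⟨o, os, rfl⟩
      by_cases hpre : (o :: os).isPrefixOf (c :: t) = true
      · rw [PySem.Chars.replace.go, if_pos hpre]
        rw [ih _ _ (by simp at hl ⊢; omega)]
        rw [pvRep, if_pos ⟨hpre, by simp⟩]
        simp [List.drop_succ_cons]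
      · rw [PySem.Chars.replace.go, if_neg hpre]
        rw [ih _ _ (by simp at hl ⊢; omega)]
        rw [pvRep, if_neg (by simp [hpre])]
        simp

theorem pvReplace_eq (old new s : List Char) (hold : old ≠ []) :
    PySem.Chars.replace s old new = pvRep old new s := by
  rw [PySem.Chars.replace, if_neg (by simp [List.isEmpty_iff, hold])]
  simpa using pvGo_eq old new hold s.length s [] le_rfl

-- proof-side single pass doing only the first two substitutions
def pvScan12 : List Char → List Char
  | [] => []
  | c :: t =>
    if pvP1.isPrefixOf (c :: t) then pvR ++ pvScan12 (t.drop 7)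
    else if pvP2.isPrefixOf (c :: t) then pvRl ++ pvScan12 (t.drop 7)
    else c :: pvScan12 t
termination_by l => l.length
decreasing_by all_goals simp [List.length_drop]

-- block lemmas: the relevant pattern does (not) match across a fixed literal head
theorem pvL1p2 (x : List Char) :
    pvRep pvP1 pvR ('a'::'p'::'p'::'f'::'o'::'l'::'i'::'o'::x)
      = 'a'::'p'::'p'::'f'::'o'::'l'::'i'::'o':: pvRep pvP1 pvR x := by
  rw [pvRep]; rw [pvRep]; rw [pvRep]; rw [pvRep]; rw [pvRep]; rw [pvRep]; rw [pvRep]; rw [pvRep]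
  simp [pvP1, List.isPrefixOf]

theorem pvL2R (y : List Char) :
    pvRep pvP2 pvRl (pvR ++ y) = pvR ++ pvRep pvP2 pvRl y := by
  simp only [pvR, List.cons_append, List.nil_append]
  rw [pvRep]; rw [pvRep]; rw [pvRep]; rw [pvRep]; rw [pvRep]; rw [pvRep]; rw [pvRep]
  simp [pvP2, List.isPrefixOf]

theorem pvL2match (y : List Char) :
    pvRep pvP2 pvRl ('a'::'p'::'p'::'f'::'o'::'l'::'i'::'o'::y) = pvRl ++ pvRep pvP2 pvRl y := by
  rw [pvRep]; simp [pvP2, List.isPrefixOf]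

theorem pvL3R (y : List Char) :
    pvRep pvP3 pvR (pvR ++ y) = pvR ++ pvRep pvP3 pvR y := by
  simp only [pvR, List.cons_append, List.nil_append]
  rw [pvRep]; rw [pvRep]; rw [pvRep]; rw [pvRep]; rw [pvRep]; rw [pvRep]; rw [pvRep]
  simp [pvP3, List.isPrefixOf]

theorem pvL3Rl (y : List Char) :
    pvRep pvP3 pvR (pvRl ++ y) = pvRl ++ pvRep pvP3 pvR y := by
  simp only [pvRl, List.cons_append, List.nil_append]
  rw [pvRep]; rw [pvRep]; rw [pvRep]; rw [pvRep]; rw [pvRep]; rw [pvRep]; rw [pvRep]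
  simp [pvP3, List.isPrefixOf]

theorem pvL3match (y : List Char) :
    pvRep pvP3 pvR ('A'::'P'::'P'::'F'::'O'::'L'::'I'::'O'::y) = pvR ++ pvRep pvP3 pvR y := by
  rw [pvRep]; simp [pvP3, List.isPrefixOf]

theorem pvScan12p3 (x : List Char) :
    pvScan12 ('A'::'P'::'P'::'F'::'O'::'L'::'I'::'O'::x)
      = 'A'::'P'::'P'::'F'::'O'::'L'::'I'::'O':: pvScan12 x := by
  rw [pvScan12]; rw [pvScan12]; rw [pvScan12]; rw [pvScan12]
  rw [pvScan12]; rw [pvScan12]; rw [pvScan12]; rw [pvScan12]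
  simp [pvP1, pvP2, List.isPrefixOf]

-- tail of a suffix is a suffix
theorem pvSuffixTail {a : Char} {l L : List Char} (h : (a :: l) <:+ L) : l <:+ L := by
  obtain ⟨s, hs⟩ := h
  exact ⟨s ++ [a], by simpa using hs⟩

-- a match of (a suffix of) pvP2 in the output of pass 1 was already there in the input
theorem pvNomatch1 : ∀ (n : Nat) (l q : List Char), l.length ≤ n → q <:+ pvP2 →
    q <+: pvRep pvP1 pvR l → q <+: l := by
  intro n
  induction n with
  | zero =>
    intro l q hl hq h
    have : l = [] := by cases l <;> simp_all
    subst this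
    rw [pvRep] at h
    exact h
  | succ n ih =>
    intro l q hl hq h
    match q with
    | [] => exact List.nil_prefix
    | q0 :: q' =>
      have hq0 : q0 ∈ pvP2 := by
        obtain ⟨s, hs⟩ := hq
        exact hs ▸ (List.mem_append.2 (Or.inr (List.mem_cons_self)))
      match l with
      | [] => rw [pvRep] at h; exact h
      | c :: t =>
        by_cases hpre : pvP1.isPrefixOf (c :: t) = true
        · rw [pvRep, if_pos ⟨hpre, by simp [pvP1]⟩] at h
          simp only [pvR, List.cons_append, List.cons_prefix_cons] at h
          obtain ⟨rfl, -⟩ := h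
          simp [pvP2] at hq0
        · rw [pvRep, if_neg (by simp [hpre])] at h
          rw [List.cons_prefix_cons] at h
          obtain ⟨rfl, h'⟩ := h
          have := ih t q' (by simp at hl ⊢; omega) (pvSuffixTail hq) h'
          exact List.cons_prefix_cons.2 ⟨rfl, this⟩

-- a match of (a suffix of) pvP3 in the output of the two-pattern scan was already there
theorem pvNomatch3 : ∀ (n : Nat) (l q : List Char), l.length ≤ n → q <:+ pvP3 →
    q <+: pvScan12 l → q <+: l := by
  intro n
  induction n with
  | zero =>
    intro l q hl hq h
    have : l = [] := by cases l <;> simp_all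
    subst this
    rw [pvScan12] at h
    exact h
  | succ n ih =>
    intro l q hl hq h
    match q with
    | [] => exact List.nil_prefix
    | q0 :: q' =>
      match l with
      | [] => rw [pvScan12] at h; exact h
      | c :: t =>
        by_cases h1 : pvP1.isPrefixOf (c :: t) = true
        · rw [pvScan12, if_pos h1] at h
          -- q is a nonempty suffix of pvP3; none of them is a prefix of pvR ++ _
          simp only [pvP3, List.suffix_cons_iff, List.suffix_nil] at hq
          rcases hq with hq|hq|hq|hq|hq|hq|hq|hq|hq <;>
            simp_all [pvR, List.cons_prefix_cons]
        · by_cases h2 : pvP2.isPrefixOf (c :: t) = true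
          · rw [pvScan12, if_neg h1, if_pos h2] at h
            simp only [pvP3, List.suffix_cons_iff, List.suffix_nil] at hq
            rcases hq with hq|hq|hq|hq|hq|hq|hq|hq|hq <;>
              simp_all [pvRl, List.cons_prefix_cons]
          · rw [pvScan12, if_neg h1, if_neg h2] at h
            rw [List.cons_prefix_cons] at h
            obtain ⟨rfl, h'⟩ := h
            have := ih t q' (by simp at hl ⊢; omega) (pvSuffixTail hq) h'
            exact List.cons_prefix_cons.2 ⟨rfl, this⟩

-- pass 2 after pass 1 equals the two-pattern single scan
theorem pvStep1 : ∀ (n : Nat) (l : List Char), l.length ≤ n →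
    pvRep pvP2 pvRl (pvRep pvP1 pvR l) = pvScan12 l := by
  intro n
  induction n with
  | zero =>
    intro l hl
    have : l = [] := by cases l <;> simp_all
    subst this
    rw [pvRep, pvRep, pvScan12]
  | succ n ih =>
    intro l hl
    match l with
    | [] => rw [pvRep, pvRep, pvScan12]
    | c :: t =>
      by_cases h1 : pvP1.isPrefixOf (c :: t) = true
      · obtain ⟨x, hx⟩ := List.isPrefixOf_iff_prefix.1 h1
        simp only [pvP1, List.cons_append, List.nil_append] at hx
        injection hx with hc ht
        subst hc; subst ht
        rw [pvScan12, if_pos h1]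
        rw [pvRep, if_pos ⟨h1, by simp [pvP1]⟩]
        rw [pvL2R]
        rw [ih _ (by simp at hl ⊢; omega)]
        simp [pvP1, List.drop]
      · by_cases h2 : pvP2.isPrefixOf (c :: t) = true
        · obtain ⟨x, hx⟩ := List.isPrefixOf_iff_prefix.1 h2
          simp only [pvP2, List.cons_append, List.nil_append] at hx
          injection hx with hc ht
          subst hc; subst ht
          rw [pvScan12, if_neg h1, if_pos h2]
          rw [pvL1p2, pvL2match]
          rw [ih _ (by simp at hl ⊢; omega)]
          simp [List.drop]
        · rw [pvScan12, if_neg h1, if_neg h2]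
          rw [pvRep, if_neg (by simp [h1])]
          have hno : ¬ (pvP2.isPrefixOf (c :: pvRep pvP1 pvR t) = true) := by
            intro hc
            have hpref : pvP2 <+: (c :: pvRep pvP1 pvR t) := List.isPrefixOf_iff_prefix.1 hc
            have heq : (c :: pvRep pvP1 pvR t) = pvRep pvP1 pvR (c :: t) := by
              rw [pvRep, if_neg (by simp [h1])]
            rw [heq] at hpref
            have := pvNomatch1 (n + 1) (c :: t) pvP2 hl List.suffix_rfl hpref
            exact h2 (List.isPrefixOf_iff_prefix.2 this)
          rw [pvRep, if_neg (by simp [hno])]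
          rw [ih _ (by simp at hl ⊢; omega)]

-- pass 3 after the two-pattern scan equals B's full scan
theorem pvStep2 : ∀ (n : Nat) (l : List Char), l.length ≤ n →
    pvRep pvP3 pvR (pvScan12 l) = pvScanB l := by
  intro n
  induction n with
  | zero =>
    intro l hl
    have : l = [] := by cases l <;> simp_all
    subst this
    rw [pvScan12, pvRep, pvScanB]
  | succ n ih =>
    intro l hl
    match l with
    | [] => rw [pvScan12, pvRep, pvScanB]
    | c :: t =>
      by_cases h1 : pvP1.isPrefixOf (c :: t) = true
      · rw [pvScan12, if_pos h1, pvScanB, if_pos h1, pvL3R]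
        rw [ih _ (by simp at hl ⊢; omega)]
      · by_cases h2 : pvP2.isPrefixOf (c :: t) = true
        · rw [pvScan12, if_neg h1, if_pos h2, pvScanB, if_neg h1, if_pos h2, pvL3Rl]
          rw [ih _ (by simp at hl ⊢; omega)]
        · by_cases h3 : pvP3.isPrefixOf (c :: t) = true
          · obtain ⟨x, hx⟩ := List.isPrefixOf_iff_prefix.1 h3
            simp only [pvP3, List.cons_append, List.nil_append] at hx
            injection hx with hc ht
            subst hc; subst ht
            rw [pvScanB, if_neg h1, if_neg h2, if_pos h3]
            rw [pvScan12p3, pvL3match]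
            rw [ih _ (by simp at hl ⊢; omega)]
            simp [List.drop]
          · rw [pvScan12, if_neg h1, if_neg h2]
            rw [pvScanB, if_neg h1, if_neg h2, if_neg h3]
            have hno : ¬ (pvP3.isPrefixOf (c :: pvScan12 t) = true) := by
              intro hc
              have hpref : pvP3 <+: (c :: pvScan12 t) := List.isPrefixOf_iff_prefix.1 hc
              have heq : (c :: pvScan12 t) = pvScan12 (c :: t) := by
                rw [pvScan12, if_neg h1, if_neg h2]
              rw [heq] at hpref
              have := pvNomatch3 (n + 1) (c :: t) pvP3 hl List.suffix_rfl hpref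
              exact h3 (List.isPrefixOf_iff_prefix.2 this)
            rw [pvRep, if_neg (by simp [hno])]
            rw [ih _ (by simp at hl ⊢; omega)]

theorem pvMain (cs : List Char) :
    PySem.Chars.replace
      (PySem.Chars.replace (PySem.Chars.replace cs pvP1 pvR) pvP2 pvRl) pvP3 pvR
      = pvScanB cs := by
  rw [pvReplace_eq _ _ _ (by decide), pvReplace_eq _ _ _ (by decide),
      pvReplace_eq _ _ _ (by decide)]
  rw [pvStep1 cs.length cs le_rfl, pvStep2 cs.length cs le_rfl]

-- ===== VERDICT (by name: the statement is the Claim_ definition above) =====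
theorem substitute_branding_spec : Claim_equal_substitute_branding := by
  intro content _
  unfold Spec_substitute_branding substitute_branding substitute_branding_alt
  have h : (PySem.Str.replace
      (PySem.Str.replace (PySem.Str.replace content "AppFolio" "AIVIIZN") "appfolio" "aiviizn")
      "APPFOLIO" "AIVIIZN").toList = pvScanB content.toList := by
    simp only [PySem.Str.toList_replace]
    have e1 : ("AppFolio" : String).toList = pvP1 := by decide
    have e2 : ("appfolio" : String).toList = pvP2 := by decide
    have e3 : ("APPFOLIO" : String).toList = pvP3 := by decide
    have e4 : ("AIVIIZN" : String).toList = pvR := by decide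
    have e5 : ("aiviizn" : String).toList = pvRl := by decide
    rw [e1, e2, e3, e4, e5]
    exact pvMain content.toList
  rw [← h, String.ofList_toList]
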